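-- pv_equiv track=rewrite | github.com/depp/headerfix | lib/header/year.py | format_years
-- ===== SOURCE A (Python) =====
-- def format_years(yearset):
--     """Format a set of years.
--
--     For example, this will format the set {1999, 2000, 2001, 2007} as
--     "1999-2001, 2007".
--     """
--     yearlist = list(yearset)
--     yearlist.sort()
--     firstyear = None
--     ranges = []
--     for year in yearlist:
--         if firstyear is None:
--             firstyear = year
--             lastyear = year
--         elif year == lastyear + 1:
--             lastyear = year
--         else:
--             ranges.append((firstyear, lastyear))
--             firstyear = year
--             lastyear = year
--     if firstyear is not None:
--         ranges.append((firstyear, lastyear))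
--     tranges = []
--     for firstyear, lastyear in ranges:
--         if firstyear < lastyear:
--             tranges.append('{}-{}'.format(firstyear, lastyear))
--         else:
--             tranges.append(str(firstyear))
--     return ', '.join(tranges)
-- ===== SOURCE B (Python) =====
-- def format_years(yearset):
--     """Format a set of years.
--
--     For example, this will format the set {1999, 2000, 2001, 2007} as
--     "1999-2001, 2007".
--     """
--     years = sorted(yearset)
--     n = len(years)
--     cuts = [i for i in range(n + 1)
--             if i == 0 or i == n or years[i] != years[i - 1] + 1]
--     return ', '.join(
--         str(years[a]) if years[a] == years[b - 1]
--         else '{}-{}'.format(years[a], years[b - 1])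
--         for a, b in zip(cuts, cuts[1:]))
-- ===== Notes on version B (the rewrite author's own statement) =====
-- stated objective: alternative
-- what changed: Replaces A's incremental firstyear/lastyear state machine (None sentinel, in-loop flush, final flush) by staged passes: one comprehension computes the list of run-boundary indices of the sorted list, then each adjacent boundary pair (a, b) from zip(cuts, cuts[1:]) is formatted directly from years[a] and years[b-1]; no running range state is maintained.
import Mathlib
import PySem

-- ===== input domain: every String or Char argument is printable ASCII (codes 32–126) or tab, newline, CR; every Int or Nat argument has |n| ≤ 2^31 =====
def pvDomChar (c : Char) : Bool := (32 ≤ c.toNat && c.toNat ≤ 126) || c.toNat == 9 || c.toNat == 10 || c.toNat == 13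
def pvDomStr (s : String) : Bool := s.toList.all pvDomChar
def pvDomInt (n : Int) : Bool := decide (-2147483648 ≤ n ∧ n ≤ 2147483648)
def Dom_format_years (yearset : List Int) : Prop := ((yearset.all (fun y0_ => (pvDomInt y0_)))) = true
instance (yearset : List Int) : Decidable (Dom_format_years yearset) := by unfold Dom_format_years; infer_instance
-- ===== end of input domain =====

-- B replaces A's incremental firstyear/lastyear state machine (None sentinel, in-loop flush,
-- final flush) by staged passes: first the run-boundary indices of the sorted list are computed
-- by one filtered range comprehension, then each adjacent boundary pair is formatted directly
-- (alternative decomposition, same cost).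

-- ===== PORT A =====
def fyAStep (st : Option (Int × Int) × List (Int × Int)) (year : Int) :
    Option (Int × Int) × List (Int × Int) :=
  match st with
  | (none, ranges) => (some (year, year), ranges)
  | (some (f, l), ranges) =>
      if year = l + 1 then (some (f, year), ranges)
      else (some (year, year), ranges ++ [(f, l)])

-- the trailing 'if firstyear is not None: ranges.append((firstyear, lastyear))'
def fyFinal (st : Option (Int × Int) × List (Int × Int)) : List (Int × Int) :=
  match st with
  | (none, ranges) => ranges
  | (some fl, ranges) => ranges ++ [fl]

def format_years (yearset : List Int) : String :=
  PySem.Str.join ", "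
    ((fyFinal ((PySem.List.sorted yearset (fun y => y) false).foldl fyAStep (none, []))).foldl
      (fun acc p =>
        acc ++ [if p.1 < p.2 then PySem.Int.toStr p.1 ++ "-" ++ PySem.Int.toStr p.2
                else PySem.Int.toStr p.1]) [])

-- ===== PORT B =====
-- the comprehension filter 'i == 0 or i == n or years[i] != years[i - 1] + 1'
def fyIsCut (years : List Int) (n i : Int) : Bool :=
  i == 0 || i == n ||
    !(PySem.List.pyGetD years i 0 == PySem.List.pyGetD years (i - 1) 0 + 1)

-- 'str(years[a]) if years[a] == years[b - 1] else "{}-{}".format(years[a], years[b - 1])'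
def fyPart (years : List Int) (ab : Int × Int) : String :=
  if PySem.List.pyGetD years ab.1 0 = PySem.List.pyGetD years (ab.2 - 1) 0 then
    PySem.Int.toStr (PySem.List.pyGetD years ab.1 0)
  else
    PySem.Int.toStr (PySem.List.pyGetD years ab.1 0) ++ "-" ++
      PySem.Int.toStr (PySem.List.pyGetD years (ab.2 - 1) 0)

def format_years_alt (yearset : List Int) : String :=
  let years := PySem.List.sorted yearset (fun y => y) false
  let n : Int := (years.length : Int)
  let cuts := (PySem.List.pyRange 0 (n + 1) 1).filter (fyIsCut years n)
  PySem.Str.join ", "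
    ((cuts.zip (PySem.List.slice cuts (some 1) none)).map (fyPart years))

-- ===== PRECONDITION & SPEC =====
def Spec_format_years (yearset : List Int) (out : String) : Prop := out = format_years_alt yearset
instance (yearset : List Int) (out : String) : Decidable (Spec_format_years yearset out) := by unfold Spec_format_years; infer_instance

-- ===== CLAIM (what is proved, stated in full; the proofs are below) =====
def Claim_equal_format_years : Prop := ∀ (yearset : List Int), Dom_format_years yearset → Spec_format_years yearset (format_years yearset)

-- ===== LEMMAS AND PROOFS =====

-- length of the maximal consecutive run continuing 'prev', its last element, and the remainder
def spanLen (prev : Int) : List Int → Nat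
  | [] => 0
  | y :: ys => if y = prev + 1 then spanLen y ys + 1 else 0

def spanLast (prev : Int) : List Int → Int
  | [] => prev
  | y :: ys => if y = prev + 1 then spanLast y ys else prev

def spanRest (prev : Int) : List Int → List Int
  | [] => []
  | y :: ys => if y = prev + 1 then spanRest y ys else y :: ys

theorem spanRest_length_le (prev : Int) (ys : List Int) :
    (spanRest prev ys).length ≤ ys.length := by
  induction ys generalizing prev with
  | nil => simp [spanRest]
  | cons y ys ih =>
    simp only [spanRest]
    split
    · exact le_trans (ih y) (by simp)
    · simp

theorem spanLen_le (prev : Int) (ys : List Int) : spanLen prev ys ≤ ys.length := by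
  induction ys generalizing prev with
  | nil => simp [spanLen]
  | cons y ys ih =>
    simp only [spanLen]
    split
    · simpa using ih y
    · simp

-- A's run list, as a structural recursion
def goA (f l : Int) : List Int → List (Int × Int)
  | [] => [(f, l)]
  | y :: ys => if y = l + 1 then goA f y ys else (f, l) :: goA y y ys

def fmtA (p : Int × Int) : String :=
  if p.1 < p.2 then PySem.Int.toStr p.1 ++ "-" ++ PySem.Int.toStr p.2 else PySem.Int.toStr p.1

def fmtB (a b : Int) : String :=
  if a = b then PySem.Int.toStr a else PySem.Int.toStr a ++ "-" ++ PySem.Int.toStr b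

-- the per-run string list both programs produce, as a structural recursion on the suffix
def fmtRunsB : List Int → List String
  | [] => []
  | y :: rest => fmtB y (spanLast y rest) :: fmtRunsB (spanRest y rest)
termination_by l => l.length
decreasing_by
  have := spanRest_length_le y rest
  simp only [List.length_cons]
  omega

theorem fmtRunsB_cons (y : Int) (rest : List Int) :
    fmtRunsB (y :: rest) = fmtB y (spanLast y rest) :: fmtRunsB (spanRest y rest) := by
  rw [fmtRunsB]

theorem lemA1 (ys : List Int) : ∀ (f l : Int) (acc : List (Int × Int)),
    fyFinal (ys.foldl fyAStep (some (f, l), acc)) = acc ++ goA f l ys := by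
  induction ys with
  | nil => intro f l acc; simp [fyFinal, goA]
  | cons y ys ih =>
    intro f l acc
    by_cases h : y = l + 1
    · simp only [List.foldl_cons, fyAStep, if_pos h, ih, goA]
    · simp only [List.foldl_cons, fyAStep, if_neg h, ih, goA, List.append_assoc,
        List.singleton_append]

theorem lemAB : ∀ (ys : List Int) (f l : Int), f ≤ l →
    (goA f l ys).map fmtA = fmtB f (spanLast l ys) :: fmtRunsB (spanRest l ys) := by
  intro ys
  induction ys with
  | nil =>
    intro f l hfl
    simp only [goA, spanLast, spanRest, List.map_cons, List.map_nil, fmtRunsB]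
    congr 1
    unfold fmtA fmtB
    rcases lt_or_eq_of_le hfl with h | h
    · rw [if_pos h, if_neg (by omega)]
    · rw [if_neg (by omega), if_pos h]
  | cons y ys ih =>
    intro f l hfl
    by_cases h : y = l + 1
    · rw [goA, if_pos h, ih f y (by omega)]
      simp [spanLast, spanRest, h]
    · rw [goA, if_neg h]
      simp only [List.map_cons, spanLast, spanRest, if_neg h]
      rw [fmtRunsB_cons]
      congr 1
      · unfold fmtA fmtB
        rcases lt_or_eq_of_le hfl with h' | h'
        · rw [if_pos h', if_neg (by omega)]
        · rw [if_neg (by omega), if_pos h']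
      · exact ih y y le_rfl

theorem drop_getD (years : List Int) (j : Nat) (y : Int) (rest : List Int)
    (hd : years.drop j = y :: rest) : PySem.List.pyGetD years (↑j) 0 = y := by
  rw [PySem.List.pyGetD_natCast]
  have h0 : (years.drop j)[0]? = years[j + 0]? := List.getElem?_drop
  rw [hd] at h0
  simp only [List.getElem?_cons_zero, Nat.add_zero] at h0
  rw [List.getD_eq_getElem?_getD, ← h0]
  rfl

theorem drop_span (years : List Int) : ∀ (rest : List Int) (j : Nat) (y : Int),
    years.drop j = y :: rest →
    years.drop (j + spanLen y rest) = spanLast y rest :: spanRest y rest := by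
  intro rest
  induction rest with
  | nil => intro j y hd; simpa [spanLen, spanLast, spanRest] using hd
  | cons r rest' ih =>
    intro j y hd
    have hd' : years.drop (j + 1) = r :: rest' := by
      rw [show years.drop (j + 1) = List.drop 1 (years.drop j) from (List.drop_drop).symm, hd]
      rfl
    by_cases hc : r = y + 1
    · have := ih (j + 1) r hd'
      simpa [spanLen, spanLast, spanRest, hc, Nat.add_comm, Nat.add_assoc,
        Nat.add_left_comm] using this
    · simpa [spanLen, spanLast, spanRest, hc] using hd

-- inside the run, each element is its predecessor plus one
theorem run_prop (years : List Int) : ∀ (rest : List Int) (i : Nat) (y : Int),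
    years.drop i = y :: rest → ∀ k, k < spanLen y rest →
    PySem.List.pyGetD years (↑(i + k + 1)) 0 = PySem.List.pyGetD years (↑(i + k)) 0 + 1 := by
  intro rest
  induction rest with
  | nil => intro i y hd k hk; simp [spanLen] at hk
  | cons r rest' ih =>
    intro i y hd k hk
    have hd' : years.drop (i + 1) = r :: rest' := by
      rw [show years.drop (i + 1) = List.drop 1 (years.drop i) from (List.drop_drop).symm, hd]
      rfl
    by_cases hc : r = y + 1
    · cases k with
      | zero =>
        simp only [Nat.add_zero]
        rw [drop_getD years i y _ hd, drop_getD years (i + 1) r _ hd']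
        simpa using hc
      | succ k' =>
        have hk' : k' < spanLen r rest' := by
          simp only [spanLen, if_pos hc] at hk; omega
        have := ih (i + 1) r hd' k' hk'
        have e1 : i + 1 + k' + 1 = i + (k' + 1) + 1 := by omega
        have e2 : i + 1 + k' = i + (k' + 1) := by omega
        rwa [e1, e2] at this
    · simp [spanLen, hc] at hk

theorem spanRest_head_ne (rest : List Int) : ∀ (prev r : Int) (rs : List Int),
    spanRest prev rest = r :: rs → r ≠ spanLast prev rest + 1 := by
  induction rest with
  | nil => intro prev r rs h; simp [spanRest] at h
  | cons y ys ih =>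
    intro prev r rs h
    by_cases hc : y = prev + 1
    · simp only [spanRest, if_pos hc] at h
      simpa [spanLast, hc] using ih y r rs h
    · simp only [spanRest, if_neg hc] at h
      injection h with h1 h2
      simp only [spanLast, if_neg hc]
      rw [← h1]
      exact hc

theorem len_of_drop (years : List Int) (i : Nat) (y : Int) (rest : List Int)
    (hd : years.drop i = y :: rest) : i + rest.length + 1 = years.length := by
  have := List.length_drop (i := i) (l := years)
  rw [hd] at this
  simp at this
  have : i ≤ years.length := by
    by_contra hlt
    rw [List.drop_eq_nil_of_le (by omega)] at hd
    simp at hd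
  omega

-- the filter rejects every index strictly inside a run
theorem notcut_in_run (years : List Int) (i : Nat) (y : Int) (rest : List Int)
    (hd : years.drop i = y :: rest) (k : Nat) (h1 : 1 ≤ k) (h2 : k ≤ spanLen y rest) :
    fyIsCut years (↑years.length) (↑(i + k)) = false := by
  have hlen := len_of_drop years i y rest hd
  have hsp := spanLen_le y rest
  have hrun := run_prop years rest i y hd (k - 1) (by omega)
  have e1 : i + (k - 1) + 1 = i + k := by omega
  rw [e1] at hrun
  simp only [fyIsCut, Bool.or_eq_false_iff, beq_eq_false_iff_ne, Bool.not_eq_false',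
    beq_iff_eq]
  refine ⟨⟨by omega, by omega⟩, ?_⟩
  have e2 : (↑(i + k) : Int) - 1 = ↑(i + (k - 1)) := by omega
  rw [e2, hrun]

-- the filter accepts the index one past a run
theorem cut_at_end (years : List Int) (i : Nat) (y : Int) (rest : List Int)
    (hd : years.drop i = y :: rest) :
    fyIsCut years (↑years.length) (↑(i + spanLen y rest + 1)) = true := by
  have hlen := len_of_drop years i y rest hd
  have hsp := spanLen_le y rest
  by_cases hn : i + spanLen y rest + 1 = years.length
  · simp [fyIsCut, hn]
  · have hspan := drop_span years rest i y hd
    have hdm : years.drop (i + spanLen y rest + 1) = spanRest y rest := by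
      rw [show years.drop (i + spanLen y rest + 1) =
            List.drop 1 (years.drop (i + spanLen y rest)) from (List.drop_drop).symm, hspan]
      rfl
    have hne : spanRest y rest ≠ [] := by
      intro hnil
      have := len_of_drop years (i + spanLen y rest) (spanLast y rest) (spanRest y rest) hspan
      rw [hnil] at this
      simp at this
      omega
    obtain ⟨r, rs, hr⟩ := List.exists_cons_of_ne_nil hne
    rw [hr] at hdm
    have hgr : PySem.List.pyGetD years (↑(i + spanLen y rest + 1)) 0 = r :=
      drop_getD years _ _ _ hdm
    have hgl : PySem.List.pyGetD years (↑(i + spanLen y rest)) 0 = spanLast y rest :=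
      drop_getD years _ _ _ hspan
    have hrne : r ≠ spanLast y rest + 1 := spanRest_head_ne rest y r rs (by rw [hr])
    have e2 : (↑(i + spanLen y rest + 1) : Int) - 1 = ↑(i + spanLen y rest) := by omega
    simp only [fyIsCut]
    rw [e2, hgr, hgl]
    simp [hrne]

-- zip(cuts, cuts[1:]) mapped with fyPart, as a structural recursion
def pairsMap (years : List Int) : List Int → List String
  | [] => []
  | [_] => []
  | a :: b :: t => fyPart years (a, b) :: pairsMap years (b :: t)

theorem zip_tail_pairsMap (years : List Int) (cs : List Int) :
    (cs.zip cs.tail).map (fyPart years) = pairsMap years cs := by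
  induction cs with
  | nil => rfl
  | cons a cs ih =>
    cases cs with
    | nil => rfl
    | cons b t =>
      simp only [List.tail_cons, List.zip_cons_cons, List.map_cons, pairsMap]
      rw [← ih]
      rfl

-- the filtered range after index i: the next cut is one past the current run
theorem cutsFrom_step (years : List Int) (i : Nat) (y : Int) (rest : List Int)
    (hd : years.drop i = y :: rest) :
    (PySem.List.pyRange (↑(i + 1)) ((years.length : Int) + 1) 1).filter
        (fyIsCut years (years.length : Int)) =
      (↑(i + spanLen y rest + 1) : Int) ::
        (PySem.List.pyRange (↑(i + spanLen y rest + 2)) ((years.length : Int) + 1) 1).filter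
          (fyIsCut years (years.length : Int)) := by
  have hlen := len_of_drop years i y rest hd
  have hsp := spanLen_le y rest
  rw [PySem.List.pyRange_one_append (↑(i + 1)) (↑(i + spanLen y rest + 1))
        ((years.length : Int) + 1) (by push_cast; omega) (by push_cast; omega),
      List.filter_append]
  have h1 : (PySem.List.pyRange (↑(i + 1)) (↑(i + spanLen y rest + 1)) 1).filter
      (fyIsCut years (years.length : Int)) = [] := by
    rw [List.filter_eq_nil_iff]
    intro j hj
    rw [PySem.List.mem_pyRange_one] at hj
    have hk : ∃ k : Nat, 1 ≤ k ∧ k ≤ spanLen y rest ∧ j = ↑(i + k) := by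
      refine ⟨(j - i).toNat, by omega, by omega, by omega⟩
    obtain ⟨k, hk1, hk2, hkj⟩ := hk
    rw [hkj]
    have h := notcut_in_run years i y rest hd k hk1 hk2
    push_cast at h
    simp [h]
  rw [h1, List.nil_append,
      PySem.List.pyRange_one_cons (by push_cast; omega), List.filter_cons,
      if_pos (cut_at_end years i y rest hd)]
  congr 2

-- main loop correspondence: B's paired cuts from position i produce the run strings of the suffix
theorem lemMain (years : List Int) : ∀ (suffix : List Int) (i : Nat),
    years.drop i = suffix → i ≤ years.length →
    pairsMap years ((↑i : Int) ::
        (PySem.List.pyRange (↑(i + 1)) ((years.length : Int) + 1) 1).filter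
          (fyIsCut years (years.length : Int))) = fmtRunsB suffix := by
  intro suffix
  induction suffix using fmtRunsB.induct with
  | case1 =>
    intro i hd hle
    have : i = years.length := by
      have := List.length_drop (i := i) (l := years)
      rw [hd] at this; simp at this; omega
    rw [this, PySem.List.pyRange_one_eq_nil (by push_cast; omega)]
    simp [pairsMap, fmtRunsB]
  | case2 y rest ih =>
    intro i hd hle
    have hlen := len_of_drop years i y rest hd
    have hsp := spanLen_le y rest
    rw [cutsFrom_step years i y rest hd]
    have hspan := drop_span years rest i y hd
    have hdm : years.drop (i + spanLen y rest + 1) = spanRest y rest := by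
      rw [show years.drop (i + spanLen y rest + 1) =
            List.drop 1 (years.drop (i + spanLen y rest)) from (List.drop_drop).symm, hspan]
      rfl
    have hrec := ih (i + spanLen y rest + 1) hdm (by omega)
    have e : i + spanLen y rest + 1 + 1 = i + spanLen y rest + 2 := by omega
    rw [e] at hrec
    rw [pairsMap, hrec, fmtRunsB_cons]
    congr 1
    have hgy : PySem.List.pyGetD years (↑i) 0 = y := drop_getD years i y _ hd
    have hgl : PySem.List.pyGetD years (↑(i + spanLen y rest)) 0 = spanLast y rest :=
      drop_getD years _ _ _ hspan
    have e2 : (↑(i + spanLen y rest + 1) : Int) - 1 = ↑(i + spanLen y rest) := by omega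
    simp only [fyPart, fmtB, e2, hgy, hgl]

-- ===== VERDICT (by name: the statement is the Claim_ definition above) =====
theorem format_years_spec : Claim_equal_format_years := by
  intro yearset _
  unfold Spec_format_years format_years format_years_alt
  simp only [PySem.List.slice_from_one]
  rw [zip_tail_pairsMap]
  have hB : ((PySem.List.pyRange 0
        ((((PySem.List.sorted yearset (fun y => y) false).length : Int)) + 1) 1).filter
        (fyIsCut (PySem.List.sorted yearset (fun y => y) false)
          ((PySem.List.sorted yearset (fun y => y) false).length : Int))) =
      (0 : Int) :: (PySem.List.pyRange 1
        ((((PySem.List.sorted yearset (fun y => y) false).length : Int)) + 1) 1).filter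
        (fyIsCut (PySem.List.sorted yearset (fun y => y) false)
          ((PySem.List.sorted yearset (fun y => y) false).length : Int)) := by
    rw [PySem.List.pyRange_one_cons (by omega), List.filter_cons]
    simp [fyIsCut]
  rw [hB]
  have hM := lemMain (PySem.List.sorted yearset (fun y => y) false)
      (PySem.List.sorted yearset (fun y => y) false) 0 (by simp) (by omega)
  simp only [Nat.cast_zero, Nat.cast_one, Nat.zero_add] at hM
  rw [hM]
  cases hs : PySem.List.sorted yearset (fun y => y) false with
  | nil => simp [fyFinal, fmtRunsB]
  | cons y t =>
    have hA : fyFinal (List.foldl fyAStep (none, []) (y :: t)) = goA y y t := by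
      rw [List.foldl_cons]
      exact (lemA1 t y y []).trans (by simp)
    show PySem.Str.join ", "
        ((fyFinal (List.foldl fyAStep (none, []) (y :: t))).foldl
          (fun acc x => acc ++ [fmtA x]) []) = _
    rw [hA, PySem.List.foldl_append_singleton_eq_map, List.nil_append,
      lemAB t y y le_rfl, ← fmtRunsB_cons]
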